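-- pv_equiv track=rewrite | github.com/Ran-Hila-Projects/dogotel-project | aws/src/handlers/cors_utils.py | is_cors_enabled_origin
-- ===== SOURCE A (Python) =====
-- from typing import Dict, Any, Optional, List, Union
--
-- def is_cors_enabled_origin(origin: str, allowed_origins: List[str]) -> bool:
--     """
--     Check if origin is in allowed origins list
--
--     Args:
--         origin: Origin to check
--         allowed_origins: List of allowed origins (can include wildcards)
--
--     Returns:
--         True if origin is allowed
--     """
--
--     if not origin:
--         return False
--
--     # Check for exact matches first
--     if origin in allowed_origins:
--         return True
--
--     # Check for wildcard matches
--     for allowed in allowed_origins: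
--         if '*' in allowed:
--             # Simple wildcard matching (you could make this more sophisticated)
--             if allowed == '*':
--                 return True
--             # Remove protocol and check domain
--             if allowed.startswith('*.'):
--                 domain_pattern = allowed[2:]  # Remove *.
--                 origin_domain = origin.split('://')[-1] if '://' in origin else origin
--                 if origin_domain.endswith(domain_pattern):
--                     return True
--
--     return False
-- ===== SOURCE B (Python) =====
-- def is_cors_enabled_origin(origin, allowed_origins):
--     if not origin:
--         return False
--     if '*' in allowed_origins or origin in allowed_origins:
--         return True
--     suffixes = {a[2:] for a in allowed_origins if a.startswith('*.')}
--     host = origin.split('://')[-1] if '://' in origin else origin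
--     lengths = {len(s) for s in suffixes}
--     return any(L <= len(host) and host[len(host) - L:] in suffixes for L in lengths)
-- ===== Notes on version B (the rewrite author's own statement) =====
-- stated objective: alternative
-- what changed: Instead of scanning the patterns and calling endswith per '*.' pattern, B builds a hash set of the '*.' suffixes and the set of their lengths once, then checks the host's tail of each occurring length for membership in the suffix set (after up-front '*' and exact-membership tests); the per-pattern endswith inner scan disappears.
import Mathlib
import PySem

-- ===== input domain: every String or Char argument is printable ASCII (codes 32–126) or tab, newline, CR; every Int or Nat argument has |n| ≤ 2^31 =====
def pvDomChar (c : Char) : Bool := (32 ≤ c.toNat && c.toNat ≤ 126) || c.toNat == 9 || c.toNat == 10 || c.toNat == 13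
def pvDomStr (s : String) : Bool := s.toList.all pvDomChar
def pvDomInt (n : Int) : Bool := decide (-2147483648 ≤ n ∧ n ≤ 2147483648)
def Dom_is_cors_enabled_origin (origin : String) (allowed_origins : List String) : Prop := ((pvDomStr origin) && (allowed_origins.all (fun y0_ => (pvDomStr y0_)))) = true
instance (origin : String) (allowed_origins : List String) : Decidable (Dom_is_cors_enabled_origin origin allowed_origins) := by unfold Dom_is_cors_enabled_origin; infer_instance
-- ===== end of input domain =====

-- B replaces A's per-pattern scan-with-endswith by a suffix SET built once from the '*.'
-- patterns, probing the protocol-stripped host's tail at each occurring suffix length (objective: alternative).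

-- ===== PORT A =====
-- origin.split('://')[-1] if '://' in origin else origin
-- (split? is some because the separator "://" is non-empty, and the result list is
-- non-empty, so [-1] is its last element; getLastD's default is never used)
def pvProtoStrip (origin : String) : String :=
  if PySem.Str.isIn "://" origin then
    ((PySem.Str.split? origin "://").getD []).getLastD origin
  else origin

-- A's 'for allowed in allowed_origins' wildcard loop with early return
def pvLoopA (origin : String) : List String → Bool
  | [] => false
  | allowed :: rest =>
    if PySem.Str.isIn "*" allowed then
      if allowed = "*" then true
      else if PySem.Str.startswith allowed "*." then
        if PySem.Str.endswith (pvProtoStrip origin) (PySem.Str.slice allowed (some 2) none) then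
          true
        else pvLoopA origin rest
      else pvLoopA origin rest
    else pvLoopA origin rest

def is_cors_enabled_origin (origin : String) (allowed_origins : List String) : Bool :=
  if origin = "" then false
  else if allowed_origins.contains origin then true
  else pvLoopA origin allowed_origins

-- ===== PORT B =====
def is_cors_enabled_origin_alt (origin : String) (allowed_origins : List String) : Bool :=
  if origin = "" then false
  else if allowed_origins.contains "*" || allowed_origins.contains origin then true
  else
    -- suffixes = {a[2:] for a in allowed_origins if a.startswith('*.')}
    let suffixes : PySem.Set String := PySem.Set.ofList
      ((allowed_origins.filter (fun a => PySem.Str.startswith a "*.")).map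
        (fun a => PySem.Str.slice a (some 2) none))
    let host := pvProtoStrip origin
    -- lengths = {len(s) for s in suffixes}
    let lengths : PySem.Set Int := PySem.Set.ofList (suffixes.map PySem.Str.len)
    -- any(L <= len(host) and host[len(host) - L:] in suffixes for L in lengths)
    -- 'any' over a set is order-independent, so iterating the Set's element list is exact
    lengths.any (fun L => decide (L ≤ PySem.Str.len host) &&
      PySem.Set.contains suffixes
        (PySem.Str.slice host (some (PySem.Str.len host - L)) none))

-- ===== PRECONDITION & SPEC =====
def Spec_is_cors_enabled_origin (origin : String) (allowed_origins : List String) (out : Bool) : Prop := out = is_cors_enabled_origin_alt origin allowed_origins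
instance (origin : String) (allowed_origins : List String) (out : Bool) : Decidable (Spec_is_cors_enabled_origin origin allowed_origins out) := by unfold Spec_is_cors_enabled_origin; infer_instance

-- ===== CLAIM (what is proved, stated in full; the proofs are below) =====
def Claim_equal_is_cors_enabled_origin : Prop := ∀ (origin : String) (allowed_origins : List String), Dom_is_cors_enabled_origin origin allowed_origins → Spec_is_cors_enabled_origin origin allowed_origins (is_cors_enabled_origin origin allowed_origins)

-- ===== LEMMAS AND PROOFS =====

-- if a string starts with "*." then "*" occurs in it
lemma star_isIn_of_startswith (a : String) (h : PySem.Str.startswith a "*." = true) :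
    PySem.Str.isIn "*" a = true := by
  rw [PySem.Str.isIn_iff_infix]
  have hp : ("*." : String).toList <+: a.toList :=
    (PySem.Chars.startswith_iff a.toList ("*." : String).toList).mp (by simpa using h)
  exact (List.IsPrefix.trans (by decide : ("*" : String).toList <+: ("*." : String).toList) hp).isInfix

-- A's wildcard branch, as a proposition
lemma branch_iff (origin a : String) :
    pvLoopA origin [a] = true ↔
      (a = "*" ∨ (PySem.Str.startswith a "*." = true ∧
        PySem.Str.endswith (pvProtoStrip origin) (PySem.Str.slice a (some 2) none) = true)) := by
  simp only [pvLoopA]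
  by_cases hin : PySem.Str.isIn "*" a = true
  · rw [if_pos hin]
    by_cases hstar : a = "*"
    · subst hstar
      rw [if_pos rfl]
      exact iff_of_true rfl (Or.inl rfl)
    · rw [if_neg hstar]
      by_cases hsw : PySem.Str.startswith a "*." = true
      · rw [if_pos hsw]
        by_cases hew : PySem.Str.endswith (pvProtoStrip origin) (PySem.Str.slice a (some 2) none) = true
        · rw [if_pos hew]
          exact iff_of_true rfl (Or.inr ⟨hsw, hew⟩)
        · rw [if_neg hew]
          exact iff_of_false (by simp)
            (by rintro (rfl | ⟨_, h⟩); exacts [hstar rfl, hew h])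
      · rw [if_neg hsw]
        exact iff_of_false (by simp)
          (by rintro (rfl | ⟨h, _⟩); exacts [hstar rfl, hsw h])
  · rw [if_neg hin]
    exact iff_of_false (by simp)
      (by rintro (rfl | ⟨hsw, _⟩)
          exacts [hin (by decide), hin (star_isIn_of_startswith a hsw)])

-- A's loop is an existential over its elements
lemma loopA_iff (origin : String) (l : List String) :
    pvLoopA origin l = true ↔ ∃ a ∈ l, pvLoopA origin [a] = true := by
  induction l with
  | nil => simp [pvLoopA]
  | cons a rest ih =>
    constructor
    · intro h
      by_cases ha : pvLoopA origin [a] = true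
      · exact ⟨a, List.mem_cons_self, ha⟩
      · have : pvLoopA origin rest = true := by
          revert h ha; simp only [pvLoopA]; split_ifs <;> simp_all
        obtain ⟨b, hb, hbt⟩ := ih.mp this
        exact ⟨b, List.mem_cons_of_mem a hb, hbt⟩
    · rintro ⟨b, hb, hbt⟩
      rcases List.mem_cons.mp hb with rfl | hb
      · revert hbt; simp only [pvLoopA]; split_ifs <;> simp_all
      · have hr := ih.mpr ⟨b, hb, hbt⟩
        simp only [pvLoopA]; split_ifs <;> simp_all
    
-- host[i:] for 0 ≤ i is drop
lemma slice_from_eq (host : String) (i : Int) (h : 0 ≤ i) :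
    PySem.Str.slice host (some i) none = String.ofList (List.drop i.toNat host.toList) := by
  simp only [PySem.Str.slice, PySem.Chars.slice, PySem.List.slice_from _ h]

-- host.endswith(s) IS 'len(s) ≤ len(host) and host[len(host)-len(s):] == s'
lemma endswith_iff_slice (host s : String) :
    PySem.Str.endswith host s = true ↔
      (PySem.Str.len s ≤ PySem.Str.len host ∧
        PySem.Str.slice host (some (PySem.Str.len host - PySem.Str.len s)) none = s) := by
  rw [PySem.Str.endswith_eq, PySem.Chars.endswith_iff]
  constructor
  · intro hsuf
    have hlen : s.toList.length ≤ host.toList.length := hsuf.length_le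
    have hle : PySem.Str.len s ≤ PySem.Str.len host := by
      simp only [PySem.Str.len_eq]; exact_mod_cast hlen
    have hd := List.suffix_iff_eq_drop.mp hsuf
    refine ⟨hle, ?_⟩
    rw [slice_from_eq _ _ (by omega)]
    have h2 : (PySem.Str.len host - PySem.Str.len s).toNat = host.toList.length - s.toList.length := by
      simp only [PySem.Str.len_eq]; omega
    rw [h2, ← hd]; simp
  · rintro ⟨hle, heq⟩
    rw [slice_from_eq _ _ (by omega)] at heq
    have := congrArg String.toList heq
    simp only [String.toList_ofList] at this
    rw [← this]
    exact List.drop_suffix _ _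

-- B's lengths/suffix-set pass, as an existential over the original list
lemma anyS_iff (origin : String) (l : List String) :
    ((PySem.Set.ofList ((PySem.Set.ofList ((l.filter (fun a => PySem.Str.startswith a "*.")).map
        (fun a => PySem.Str.slice a (some 2) none))).map PySem.Str.len)).any
      (fun L => decide (L ≤ PySem.Str.len (pvProtoStrip origin)) &&
        PySem.Set.contains
          (PySem.Set.ofList ((l.filter (fun a => PySem.Str.startswith a "*.")).map
            (fun a => PySem.Str.slice a (some 2) none)))
          (PySem.Str.slice (pvProtoStrip origin)
            (some (PySem.Str.len (pvProtoStrip origin) - L)) none)) = true) ↔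
    (∃ a ∈ l, PySem.Str.startswith a "*." = true ∧
      PySem.Str.endswith (pvProtoStrip origin) (PySem.Str.slice a (some 2) none) = true) := by
  rw [List.any_eq_true]
  constructor
  · rintro ⟨L, hL, hc⟩
    rw [Bool.and_eq_true, decide_eq_true_iff] at hc
    obtain ⟨hle, hmem⟩ := hc
    have hL0 : 0 ≤ L := by
      rw [PySem.Set.mem_ofList, List.mem_map] at hL
      obtain ⟨s', _, rfl⟩ := hL
      simp only [PySem.Str.len_eq]
      exact Int.natCast_nonneg _
    rw [PySem.Set.contains_iff, PySem.Set.mem_ofList, List.mem_map] at hmem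
    obtain ⟨a, ha, hslice⟩ := hmem
    rw [List.mem_filter] at ha
    -- the host slice found in the set is a suffix of host of length L ≤ len host
    refine ⟨a, ha.1, ha.2, ?_⟩
    rw [PySem.Str.endswith_eq, PySem.Chars.endswith_iff, hslice,
      slice_from_eq _ _ (by omega)]
    simp only [String.toList_ofList]
    exact List.drop_suffix _ _
  · rintro ⟨a, ha, hsw, hew⟩
    obtain ⟨hle, hslice⟩ := (endswith_iff_slice (pvProtoStrip origin) _).mp hew
    have hmemS : PySem.Str.slice a (some 2) none ∈
        ((l.filter (fun a => PySem.Str.startswith a "*.")).map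
          (fun a => PySem.Str.slice a (some 2) none)) :=
      List.mem_map.mpr ⟨a, List.mem_filter.mpr ⟨ha, hsw⟩, rfl⟩
    refine ⟨PySem.Str.len (PySem.Str.slice a (some 2) none), ?_, ?_⟩
    · rw [PySem.Set.mem_ofList, List.mem_map]
      exact ⟨_, (PySem.Set.mem_ofList _ _).mpr hmemS, rfl⟩
    · rw [Bool.and_eq_true, decide_eq_true_iff]
      refine ⟨hle, ?_⟩
      rw [PySem.Set.contains_iff, PySem.Set.mem_ofList, hslice]
      exact hmemS

-- ===== VERDICT (by name: the statement is the Claim_ definition above) =====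
theorem is_cors_enabled_origin_spec : Claim_equal_is_cors_enabled_origin := by
  intro origin allowed_origins _
  unfold Spec_is_cors_enabled_origin is_cors_enabled_origin is_cors_enabled_origin_alt
  by_cases h0 : origin = ""
  · simp [h0]
  · simp only [h0, if_false]
    rw [Bool.eq_iff_iff]
    simp only [Bool.or_eq_true, List.contains_iff_mem]
    split_ifs with hm hs hs
    · exact iff_of_true rfl rfl
    · exact absurd (Or.inr hm) hs
    · refine iff_of_true ?_ rfl
      have hstar : "*" ∈ allowed_origins := hs.resolve_right hm
      exact (loopA_iff origin allowed_origins).mpr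
        ⟨"*", hstar, (branch_iff origin "*").mpr (Or.inl rfl)⟩
    · rw [loopA_iff, anyS_iff]
      constructor
      · rintro ⟨a, ha, hb⟩
        rcases (branch_iff origin a).mp hb with rfl | hq
        · exact absurd (Or.inl ha) hs
        · exact ⟨a, ha, hq⟩
      · rintro ⟨a, ha, hq⟩
        exact ⟨a, ha, (branch_iff origin a).mpr (Or.inr hq)⟩
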